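-- pv_equiv track=rewrite | github.com/jeanmadao/everybody_codes | 2024/quest_03/part2/main.py | dig_map
-- ===== SOURCE A (Python) =====
-- def dig_map(grid):
--     diggable = True
--     total_dug = 0
--     height = len(grid)
--     width = len(grid[0])
--     while diggable:
--         next_layer = [['.' for _ in range(width)] for _ in range(height)]
--         layer_dug = 0
--         for i in range(height):
--             for j in range(width):
--                 if grid[i][j] == '#':
--                     layer_dug += 1
--                     if 0 < i < height - 1 and 0 < j < width - 1:
--                         if grid[i-1][j] == '#' and grid[i+1][j] == '#' and grid[i][j-1] == '#' and grid[i][j+1] == '#':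
--                             next_layer[i][j] = '#'
--         if layer_dug > 0:
--             total_dug += layer_dug
--             grid = next_layer
--         else:
--             diggable = False
--
--     return total_dug
-- ===== SOURCE B (Python) =====
-- def dig_map(grid):
--     height = len(grid)
--     width = len(grid[0])
--     holes = [(p, q) for p in range(height) for q in range(width) if grid[p][q] != '#']
--     total = 0
--     for i in range(height):
--         for j in range(width):
--             if grid[i][j] == '#':
--                 d = min(i + 1, height - i, j + 1, width - j)
--                 for (p, q) in holes:
--                     d = min(d, abs(i - p) + abs(j - q))
--                 total += d
--     return total
-- ===== Notes on version B (the rewrite author's own statement) =====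
-- stated objective: alternative
-- what changed: Replaces the iterated layer-by-layer erosion loop with a direct per-cell computation: each '#' cell contributes its exact depth, the minimum L1 distance to the grid border or to any non-'#' cell, computed against a hole list built once.
import Mathlib
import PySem

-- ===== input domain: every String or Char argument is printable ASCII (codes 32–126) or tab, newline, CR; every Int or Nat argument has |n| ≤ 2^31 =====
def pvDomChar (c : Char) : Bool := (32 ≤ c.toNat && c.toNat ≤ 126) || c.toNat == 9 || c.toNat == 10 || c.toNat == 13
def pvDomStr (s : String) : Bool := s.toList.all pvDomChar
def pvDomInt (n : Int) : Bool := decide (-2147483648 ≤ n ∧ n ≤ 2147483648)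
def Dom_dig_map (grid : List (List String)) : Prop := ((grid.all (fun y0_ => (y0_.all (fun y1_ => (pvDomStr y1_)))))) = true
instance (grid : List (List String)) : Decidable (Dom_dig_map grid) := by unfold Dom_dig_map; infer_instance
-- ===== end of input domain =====

-- B replaces the iterated erosion loop by a direct per-'#'-cell depth (min L1 distance to the
-- border or to a non-'#' cell, scanned from a hole list built once); equal return value proved.

-- ===== PORT A =====
-- grid[i][j] for in-range Nat indices (Pre_ excludes the ragged/empty grids where Python raises)
def pvCell (grid : List (List String)) (i j : Nat) : String :=
  (grid.getD i []).getD j ""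

-- the nested '#'-neighbour test of A, in A's order: interior check, then the four neighbours
def pvErodeCond (grid : List (List String)) (height width i j : Nat) : Bool :=
  decide (0 < i) && decide (i < height - 1) && decide (0 < j) && decide (j < width - 1) &&
  (pvCell grid (i-1) j == "#") && (pvCell grid (i+1) j == "#") &&
  (pvCell grid i (j-1) == "#") && (pvCell grid i (j+1) == "#")

-- body of A's double for-loop: state = (next_layer, layer_dug)
def pvLayer (grid : List (List String)) (height width : Nat) :
    List (List String) × Int :=
  let next := (List.range height).map (fun _ => (List.range width).map (fun _ => "."))
  (List.range height).foldl (fun st i =>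
    (List.range width).foldl (fun st j =>
      if pvCell grid i j == "#" then
        ((if pvErodeCond grid height width i j
            then st.1.modify i (fun row => row.set j "#") else st.1), st.2 + 1)
      else st) st) (next, 0)

-- A's while-loop; the fuel height+1 is enough: the k-th layer is empty once 2*k ≥ height
def pvLoop (height width : Nat) (fuel : Nat) (grid : List (List String)) (total : Int) : Int :=
  match fuel with
  | 0 => total
  | fuel' + 1 =>
    let st := pvLayer grid height width
    if st.2 > 0 then pvLoop height width fuel' st.1 (total + st.2) else total

def dig_map (grid : List (List String)) : Int :=
  pvLoop grid.length (grid.headD []).length (grid.length + 1) grid 0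

-- ===== PORT B =====
-- the hole list of B: coordinates of in-range cells that are not '#'
def pvHoles (grid : List (List String)) (height width : Nat) : List (Int × Int) :=
  (List.range height).flatMap (fun p =>
    ((List.range width).filter (fun q => !(pvCell grid p q == "#"))).map
      (fun (q : Nat) => ((p : Int), (q : Int))))

def dig_map_alt (grid : List (List String)) : Int :=
  let height := grid.length
  let width := (grid.headD []).length
  let holes := pvHoles grid height width
  (List.range height).foldl (fun total i =>
    (List.range width).foldl (fun total j =>
      if pvCell grid i j == "#" then
        let d0 : Int := min (min (min ((i : Int) + 1) ((height : Int) - (i : Int)))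
                             ((j : Int) + 1)) ((width : Int) - (j : Int))
        let d : Int := holes.foldl
          (fun d pq => min d (|(i : Int) - pq.1| + |(j : Int) - pq.2|)) d0
        total + d
      else total) total) 0

-- ===== PRECONDITION & SPEC =====
-- Pre_ excludes exactly the inputs where Python A raises: the empty grid (len(grid[0]) is an
-- IndexError) and grids with a row shorter than the first row (grid[i][j] is an IndexError).
def Pre_dig_map (grid : List (List String)) : Prop :=
  grid ≠ [] ∧ ∀ row ∈ grid, (grid.headD []).length ≤ row.length
instance (grid : List (List String)) : Decidable (Pre_dig_map grid) := by
  unfold Pre_dig_map; infer_instance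
def pvWitness_dig_map : List (List String) := [["#", "#"], ["#", "."]]

def Spec_dig_map (grid : List (List String)) (out : Int) : Prop := out = dig_map_alt grid
instance (grid : List (List String)) (out : Int) : Decidable (Spec_dig_map grid out) := by
  unfold Spec_dig_map; infer_instance

-- ===== CLAIM (what is proved, stated in full; the proofs are below) =====
def Claim_equal_dig_map : Prop := ∀ (grid : List (List String)), Dom_dig_map grid → Pre_dig_map grid → Spec_dig_map grid (dig_map grid)

-- ===== LEMMAS AND PROOFS =====

-- abstract erosion on boolean pictures over ℤ², and the picture of a grid
def pvEr (g : Int → Int → Bool) : Int → Int → Bool := fun i j =>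
  g i j && g (i-1) j && g (i+1) j && g i (j-1) && g i (j+1)

def pvGx (grid : List (List String)) (height width : Nat) : Int → Int → Bool := fun i j =>
  decide (0 ≤ i ∧ i < (height : Int) ∧ 0 ≤ j ∧ j < (width : Int)) &&
  (pvCell grid i.toNat j.toNat == "#")

def pvDist (i j p q : Int) : Nat := (i - p).natAbs + (j - q).natAbs

def pvCnt (g : Int → Int → Bool) (height width : Nat) : Int :=
  ∑ i ∈ Finset.range height, ∑ j ∈ Finset.range width,
    (if g (i : Int) (j : Int) then (1 : Int) else 0)

lemma pvErParts {g : Int → Int → Bool} {x y : Int} (h : pvEr g x y = true) :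
    g x y = true ∧ g (x-1) y = true ∧ g (x+1) y = true ∧
    g x (y-1) = true ∧ g x (y+1) = true := by
  unfold pvEr at h; simp only [Bool.and_eq_true] at h
  exact ⟨h.1.1.1.1, h.1.1.1.2, h.1.1.2, h.1.2, h.2⟩

-- k-fold erosion = erosion by the L1 ball of radius k
lemma pvBall : ∀ (k : Nat) (g : Int → Int → Bool) (i j : Int),
    (pvEr^[k] g) i j = true ↔ ∀ p q : Int, pvDist i j p q ≤ k → g p q = true := by
  intro k
  induction k with
  | zero =>
    intro g i j
    simp only [Function.iterate_zero, id_eq]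
    constructor
    · intro h p q hd
      have hp : p = i ∧ q = j := by unfold pvDist at hd; constructor <;> omega
      rw [hp.1, hp.2]; exact h
    · intro h; exact h i j (by unfold pvDist; simp)
  | succ k ih =>
    intro g i j
    rw [Function.iterate_succ_apply, ih (pvEr g) i j]
    constructor
    · intro h p q hd
      by_cases hk : pvDist i j p q ≤ k
      · exact (pvErParts (h p q hk)).1
      · by_cases hp1 : p < i
        · have h2 := pvErParts (h (p+1) q (by unfold pvDist at *; omega))
          have e : p + 1 - 1 = p := by omega
          rw [e] at h2; exact h2.2.1
        · by_cases hp2 : i < p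
          · have h2 := pvErParts (h (p-1) q (by unfold pvDist at *; omega))
            have e : p - 1 + 1 = p := by omega
            rw [e] at h2; exact h2.2.2.1
          · by_cases hq1 : q < j
            · have h2 := pvErParts (h p (q+1) (by unfold pvDist at *; omega))
              have e : q + 1 - 1 = q := by omega
              rw [e] at h2; exact h2.2.2.2.1
            · by_cases hq2 : j < q
              · have h2 := pvErParts (h p (q-1) (by unfold pvDist at *; omega))
                have e : q - 1 + 1 = q := by omega
                rw [e] at h2; exact h2.2.2.2.2
              · exact absurd (by unfold pvDist at *; omega : pvDist i j p q ≤ k) hk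
    · intro h p q hd
      unfold pvEr; simp only [Bool.and_eq_true]
      refine ⟨⟨⟨⟨?_, ?_⟩, ?_⟩, ?_⟩, ?_⟩ <;> apply h <;> (unfold pvDist at *; omega)

lemma pvMono (g : Int → Int → Bool) (i j : Int) {k t : Nat} (hkt : k ≤ t)
    (h : (pvEr^[t] g) i j = true) : (pvEr^[k] g) i j = true := by
  rw [pvBall] at h ⊢; exact fun p q hd => h p q (le_trans hd hkt)

-- generic fold lemmas
lemma pvFoldlAdd {α : Type} (G : Int → α → Int) (f : α → Int)
    (hG : ∀ t x, G t x = t + f x) : ∀ (l : List α) (a : Int),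
    l.foldl G a = a + (l.map f).sum := by
  intro l; induction l with
  | nil => simp
  | cons x l ih => intro a; simp [List.foldl_cons, hG, ih, add_assoc]

lemma pvRangeSum (n : Nat) (f : Nat → Int) :
    ((List.range n).map f).sum = ∑ x ∈ Finset.range n, f x := by
  induction n with
  | zero => simp
  | succ n ih => rw [List.range_succ, Finset.sum_range_succ]; simp [ih]

lemma pvFoldlMinLeInit {α : Type} (f : α → Int) :
    ∀ (l : List α) (a : Int), l.foldl (fun d x => min d (f x)) a ≤ a := by
  intro l; induction l with
  | nil => simp
  | cons x l ih => intro a; exact le_trans (ih _) (min_le_left _ _)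

lemma pvFoldlMinLeMem {α : Type} (f : α → Int) :
    ∀ (l : List α) (a : Int) (x : α), x ∈ l → l.foldl (fun d x => min d (f x)) a ≤ f x := by
  intro l; induction l with
  | nil => simp
  | cons y l ih =>
    intro a x hx
    simp only [List.foldl_cons]
    rcases List.mem_cons.mp hx with h | h
    · subst h; exact le_trans (pvFoldlMinLeInit _ _ _) (min_le_right _ _)
    · exact ih _ _ h

lemma pvLeFoldlMin {α : Type} (f : α → Int) :
    ∀ (l : List α) (a c : Int), c ≤ a → (∀ x ∈ l, c ≤ f x) →
      c ≤ l.foldl (fun d x => min d (f x)) a := by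
  intro l; induction l with
  | nil => intro a c h _; simpa using h
  | cons x l ih =>
    intro a c h hl
    exact ih _ _ (le_min h (hl x (by simp))) (fun y hy => hl y (by simp [hy]))

-- the write of A's inner loop, and its guard
def pvW (i j : Nat) (nl : List (List String)) : List (List String) :=
  nl.modify i (fun row => row.set j "#")

def pvP (grid : List (List String)) (height width i j : Nat) : Bool :=
  (pvCell grid i j == "#") && pvErodeCond grid height width i j

def pvShape (height width : Nat) (nl : List (List String)) : Prop :=
  nl.length = height ∧ ∀ a, (nl.getD a []).length = if a < height then width else 0

lemma pvFoldlExt {α β : Type} (f g : β → α → β) (H : ∀ b x, f b x = g b x) :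
    ∀ (l : List α) (b : β), l.foldl f b = l.foldl g b := by
  intro l; induction l with
  | nil => simp
  | cons x l ih => intro b; simp only [List.foldl_cons, H, ih]

lemma pvFoldlPair {α β γ : Type} (f : β → α → β) (g : γ → α → γ) :
    ∀ (l : List α) (b : β) (c : γ),
      l.foldl (fun st x => (f st.1 x, g st.2 x)) (b, c) = (l.foldl f b, l.foldl g c) := by
  intro l; induction l with
  | nil => simp
  | cons x l ih => intro b c; simp only [List.foldl_cons, ih]

-- A's layer fold splits into the picture fold and the counter fold
lemma pvLayerSplit (grid : List (List String)) (height width : Nat) :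
    pvLayer grid height width =
      ((List.range height).foldl (fun nl i =>
          (List.range width).foldl (fun nl j =>
            if pvP grid height width i j then pvW i j nl else nl) nl)
        ((List.range height).map (fun _ => (List.range width).map (fun _ => "."))),
       (List.range height).foldl (fun d i =>
          (List.range width).foldl (fun d j =>
            d + (if pvCell grid i j == "#" then (1:Int) else 0)) d) 0) := by
  unfold pvLayer
  have hstep : ∀ (st : List (List String) × Int) (i j : Nat),
      (if pvCell grid i j == "#" then
          ((if pvErodeCond grid height width i j
              then st.1.modify i (fun row => row.set j "#") else st.1), st.2 + 1)
        else st) =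
      ((fun nl j => if pvP grid height width i j then pvW i j nl else nl) st.1 j,
       (fun d j => d + (if pvCell grid i j == "#" then (1:Int) else 0)) st.2 j) := by
    intro st i j
    by_cases hc : pvCell grid i j == "#" <;>
      by_cases hp : pvErodeCond grid height width i j <;>
        simp [pvP, pvW, hc, hp]
  have hin : ∀ (st : List (List String) × Int) (i : Nat),
      (List.range width).foldl (fun st j =>
        if pvCell grid i j == "#" then
          ((if pvErodeCond grid height width i j
              then st.1.modify i (fun row => row.set j "#") else st.1), st.2 + 1)
        else st) st =
      ((List.range width).foldl (fun nl j =>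
          if pvP grid height width i j then pvW i j nl else nl) st.1,
       (List.range width).foldl (fun d j =>
          d + (if pvCell grid i j == "#" then (1:Int) else 0)) st.2) := by
    intro st i
    obtain ⟨nl0, d0⟩ := st
    rw [pvFoldlExt _ _ (fun st j => hstep st i j)]
    exact pvFoldlPair
      (fun nl j => if pvP grid height width i j then pvW i j nl else nl)
      (fun d j => d + (if pvCell grid i j == "#" then (1:Int) else 0)) _ nl0 d0
  rw [pvFoldlExt _ _ (fun st i => hin st i)]
  exact pvFoldlPair
    (fun nl i => (List.range width).foldl (fun nl j =>
        if pvP grid height width i j then pvW i j nl else nl) nl)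
    (fun d i => (List.range width).foldl (fun d j =>
        d + (if pvCell grid i j == "#" then (1:Int) else 0)) d) _ _ _

lemma pvCellW (nl : List (List String)) (i j a b : Nat) :
    pvCell (pvW i j nl) a b =
      if a = i ∧ b = j ∧ i < nl.length ∧ j < (nl.getD i []).length then "#"
      else pvCell nl a b := by
  unfold pvCell pvW
  simp only [List.getD_eq_getElem?_getD, List.getElem?_modify]
  by_cases h1 : a = i
  · subst h1
    cases hrow : nl[a]? with
    | none =>
      have hlen : nl.length ≤ a := List.getElem?_eq_none_iff.mp hrow
      rw [if_neg (by omega)]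
      simp
    | some row =>
      have hlen : a < nl.length := by
        rcases List.getElem?_eq_some_iff.mp hrow with ⟨h, _⟩; exact h
      simp only [hrow, Option.map_some, if_pos rfl, Option.getD_some,
        List.getElem?_set]
      by_cases h2 : b = j
      · subst h2
        by_cases h3 : b < row.length
        · simp [h3, hlen]
        · simp [h3, hlen]
      · have h2' : ¬ j = b := fun h => h2 h.symm
        simp [List.getElem?_set, h2', h2]
  · have h1' : ¬ i = a := fun h => h1 h.symm
    cases hrow : nl[a]? <;> simp [hrow, h1, h1']

lemma pvShapeW (height width : Nat) (nl : List (List String)) (i j : Nat)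
    (h : pvShape height width nl) : pvShape height width (pvW i j nl) := by
  obtain ⟨h1, h2⟩ := h
  refine ⟨by simp [pvW, List.length_modify, h1], fun a => ?_⟩
  have := h2 a
  simp only [List.getD_eq_getElem?_getD, pvW, List.getElem?_modify] at *
  cases hrow : nl[a]? with
  | none => simpa [hrow] using this
  | some row =>
    by_cases hia : i = a <;> simpa [hrow, hia, List.length_set] using this

lemma pvGxNat (grid : List (List String)) (height width a b : Nat)
    (ha : a < height) (hb : b < width) :
    pvGx grid height width (a : Int) (b : Int) = (pvCell grid a b == "#") := by
  unfold pvGx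
  rw [decide_eq_true (by refine ⟨by omega, by exact_mod_cast ha, by omega, by exact_mod_cast hb⟩)]
  simp

lemma pvInnerWrites (grid : List (List String)) (height width i : Nat) (hi : i < height) :
    ∀ (l : List Nat) (nl : List (List String)), pvShape height width nl →
      (∀ j ∈ l, j < width) →
      pvShape height width (l.foldl (fun nl j =>
          if pvP grid height width i j then pvW i j nl else nl) nl) ∧
      ∀ a b : Nat, pvCell (l.foldl (fun nl j =>
          if pvP grid height width i j then pvW i j nl else nl) nl) a b =
        if a = i ∧ b ∈ l ∧ pvP grid height width i b = true then "#" else pvCell nl a b := by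
  intro l
  induction l with
  | nil => intro nl hs _; exact ⟨hs, by intro a b; simp⟩
  | cons x l ih =>
    intro nl hs hmem
    have hx : x < width := hmem x (by simp)
    simp only [List.foldl_cons]
    obtain ⟨rs, rc⟩ := ih (if pvP grid height width i x then pvW i x nl else nl)
      (by split
          · exact pvShapeW _ _ _ _ _ hs
          · exact hs)
      (fun j hj => hmem j (List.mem_cons_of_mem _ hj))
    refine ⟨rs, fun a b => ?_⟩
    rw [rc a b]
    have hcell' : pvCell (if pvP grid height width i x then pvW i x nl else nl) a b =
        if a = i ∧ b = x ∧ pvP grid height width i x = true then "#" else pvCell nl a b := by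
      by_cases hp : pvP grid height width i x = true
      · rw [if_pos hp, pvCellW]
        have hl1 : i < nl.length := by rw [hs.1]; exact hi
        have hl3 : x < (nl.getD i []).length := by rw [hs.2 i]; simp [hi, hx]
        by_cases hab : a = i ∧ b = x
        · rw [if_pos ⟨hab.1, hab.2, hl1, hl3⟩, if_pos ⟨hab.1, hab.2, hp⟩]
        · rw [if_neg (by tauto), if_neg (by tauto)]
      · rw [if_neg hp, if_neg (by tauto)]
    rw [hcell']
    by_cases ha : a = i
    · subst ha
      by_cases hbx : b = x
      · subst hbx
        by_cases hp : pvP grid height width a b = true <;> simp [hp, List.mem_cons]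
      · simp only [List.mem_cons]
        by_cases hbl : b ∈ l <;>
          by_cases hp : pvP grid height width a b = true <;> simp [hbx, hbl, hp]
    · simp [ha]

lemma pvOuterWrites (grid : List (List String)) (height width : Nat) :
    ∀ (l : List Nat) (nl : List (List String)), pvShape height width nl →
      (∀ i ∈ l, i < height) →
      ∀ a b : Nat, pvCell (l.foldl (fun nl i =>
          (List.range width).foldl (fun nl j =>
            if pvP grid height width i j then pvW i j nl else nl) nl) nl) a b =
        if a ∈ l ∧ b < width ∧ pvP grid height width a b = true then "#" else pvCell nl a b := by
  intro l
  induction l with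
  | nil => intro nl _ _ a b; simp
  | cons x l ih =>
    intro nl hs hmem a b
    have hx : x < height := hmem x (by simp)
    simp only [List.foldl_cons]
    have inner := pvInnerWrites grid height width x hx (List.range width) nl hs
      (fun j hj => List.mem_range.mp hj)
    rw [ih _ inner.1 (fun i hi => hmem i (by simp [hi])) a b, inner.2 a b]
    by_cases hax : a = x
    · subst hax
      by_cases hb : b < width <;>
        by_cases hp : pvP grid height width a b = true <;>
          simp [List.mem_range, List.mem_cons, hb, hp]
    · have hax' : ¬ a = x := hax
      simp [List.mem_cons, hax']

lemma pvInitShape (height width : Nat) :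
    pvShape height width
      ((List.range height).map (fun _ => (List.range width).map (fun _ => "."))) := by
  refine ⟨by simp, fun a => ?_⟩
  simp only [List.getD_eq_getElem?_getD, List.getElem?_map]
  by_cases ha : a < height
  · simp [List.getElem?_range ha, ha]
  · have hnone : (List.range height)[a]? = none := by
      rw [List.getElem?_eq_none_iff, List.length_range]; omega
    simp [hnone, ha]

lemma pvInitCell (height width a b : Nat) :
    pvCell ((List.range height).map (fun _ => (List.range width).map (fun _ => "."))) a b =
      if a < height ∧ b < width then "." else "" := by
  unfold pvCell
  simp only [List.getD_eq_getElem?_getD, List.getElem?_map]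
  by_cases ha : a < height
  · by_cases hb : b < width
    · simp [List.getElem?_range ha, List.getElem?_range hb, ha, hb]
    · have hbn : (List.range width)[b]? = none := by
        rw [List.getElem?_eq_none_iff, List.length_range]; omega
      simp [List.getElem?_range ha, hbn, ha, hb]
  · have hnone : (List.range height)[a]? = none := by
      rw [List.getElem?_eq_none_iff, List.length_range]; omega
    simp [hnone, ha]

-- characterisation of the layer built by A
lemma pvLayerSnd (grid : List (List String)) (height width : Nat) :
    (pvLayer grid height width).2 = pvCnt (pvGx grid height width) height width := by
  have h := congrArg Prod.snd (pvLayerSplit grid height width)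
  simp only at h
  rw [h]
  rw [pvFoldlAdd _ (fun i => ∑ j ∈ Finset.range width,
        (if pvCell grid i j == "#" then (1:Int) else 0))
      (fun t x => by
        rw [pvFoldlAdd _ (fun j => if pvCell grid x j == "#" then (1:Int) else 0)
            (fun t j => rfl), pvRangeSum]),
      pvRangeSum, zero_add]
  unfold pvCnt
  refine Finset.sum_congr rfl (fun a ha => Finset.sum_congr rfl (fun b hb => ?_))
  rw [pvGxNat grid height width a b (Finset.mem_range.mp ha) (Finset.mem_range.mp hb)]

lemma pvLayerFst (grid : List (List String)) (height width : Nat) :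
    ∀ i j : Int, pvGx (pvLayer grid height width).1 height width i j
      = pvEr (pvGx grid height width) i j := by
  intro i j
  by_cases hb : 0 ≤ i ∧ i < (height : Int) ∧ 0 ≤ j ∧ j < (width : Int)
  · obtain ⟨h0i, hih, h0j, hjw⟩ := hb
    obtain ⟨a, rfl⟩ : ∃ a : Nat, i = (a : Int) := ⟨i.toNat, (Int.toNat_of_nonneg h0i).symm⟩
    obtain ⟨b, rfl⟩ : ∃ b : Nat, j = (b : Int) := ⟨j.toNat, (Int.toNat_of_nonneg h0j).symm⟩
    have ha : a < height := by exact_mod_cast hih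
    have hbw : b < width := by exact_mod_cast hjw
    have hfst := congrArg Prod.fst (pvLayerSplit grid height width)
    simp only at hfst
    have houter := (pvOuterWrites grid height width (List.range height)
      ((List.range height).map (fun _ => (List.range width).map (fun _ => ".")))
      (pvInitShape _ _) (fun i hi => List.mem_range.mp hi)) a b
    have hL : pvGx (pvLayer grid height width).1 height width (a : Int) (b : Int)
        = pvP grid height width a b := by
      rw [pvGxNat _ _ _ _ _ ha hbw, hfst, houter, pvInitCell]
      by_cases hp : pvP grid height width a b = true
      · simp [List.mem_range, ha, hbw, hp]
      · simp [List.mem_range, ha, hbw, hp]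
    rw [hL]
    -- now case on the interior conditions
    by_cases c1 : 0 < a
    · by_cases c2 : a < height - 1
      · by_cases c3 : 0 < b
        · by_cases c4 : b < width - 1
          · -- interior: all neighbour reads are in range
            have e1 : pvGx grid height width ((a : Int) - 1) (b : Int)
                = (pvCell grid (a-1) b == "#") := by
              unfold pvGx
              rw [decide_eq_true (by refine ⟨by omega, by push_cast; omega, by omega, by push_cast; omega⟩)]
              simp [show ((a : Int) - 1).toNat = a - 1 by omega]
            have e2 : pvGx grid height width ((a : Int) + 1) (b : Int)
                = (pvCell grid (a+1) b == "#") := by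
              unfold pvGx
              rw [decide_eq_true (by refine ⟨by omega, by push_cast; omega, by omega, by push_cast; omega⟩)]
              simp [show ((a : Int) + 1).toNat = a + 1 by omega]
            have e3 : pvGx grid height width (a : Int) ((b : Int) - 1)
                = (pvCell grid a (b-1) == "#") := by
              unfold pvGx
              rw [decide_eq_true (by refine ⟨by omega, by push_cast; omega, by omega, by push_cast; omega⟩)]
              simp [show ((b : Int) - 1).toNat = b - 1 by omega]
            have e4 : pvGx grid height width (a : Int) ((b : Int) + 1)
                = (pvCell grid a (b+1) == "#") := by
              unfold pvGx
              rw [decide_eq_true (by refine ⟨by omega, by push_cast; omega, by omega, by push_cast; omega⟩)]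
              simp [show ((b : Int) + 1).toNat = b + 1 by omega]
            unfold pvEr
            rw [e1, e2, e3, e4, pvGxNat _ _ _ _ _ ha hbw]
            unfold pvP pvErodeCond
            rw [decide_eq_true c1, decide_eq_true c2, decide_eq_true c3, decide_eq_true c4]
            simp [Bool.and_assoc]
          · -- b = width - 1: the right neighbour is out of range
            have e4 : pvGx grid height width (a : Int) ((b : Int) + 1) = false := by
              unfold pvGx; rw [decide_eq_false (by push_cast; omega)]; simp
            unfold pvEr pvP pvErodeCond
            rw [e4, decide_eq_false c4]
            simp
        · have e3 : pvGx grid height width (a : Int) ((b : Int) - 1) = false := by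
            unfold pvGx; rw [decide_eq_false (by omega)]; simp
          unfold pvEr pvP pvErodeCond
          rw [e3, decide_eq_false c3]
          simp
      · have e2 : pvGx grid height width ((a : Int) + 1) (b : Int) = false := by
          unfold pvGx; rw [decide_eq_false (by push_cast; omega)]; simp
        unfold pvEr pvP pvErodeCond
        rw [e2, decide_eq_false c2]
        simp
    · have e1 : pvGx grid height width ((a : Int) - 1) (b : Int) = false := by
        unfold pvGx; rw [decide_eq_false (by omega)]; simp
      unfold pvEr pvP pvErodeCond
      rw [e1, decide_eq_false c1]
      simp
  · have l1 : pvGx (pvLayer grid height width).1 height width i j = false := by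
      unfold pvGx; rw [decide_eq_false hb]; simp
    have l2 : pvGx grid height width i j = false := by
      unfold pvGx; rw [decide_eq_false hb]; simp
    rw [l1]
    unfold pvEr
    rw [l2]
    simp

lemma pvCntNonneg (g : Int → Int → Bool) (height width : Nat) :
    0 ≤ pvCnt g height width := by
  unfold pvCnt
  refine Finset.sum_nonneg (fun i _ => Finset.sum_nonneg (fun j _ => ?_))
  split <;> omega

lemma pvCntZero {g : Int → Int → Bool} {height width : Nat}
    (h : pvCnt g height width = 0) :
    ∀ a b : Nat, a < height → b < width → g (a : Int) (b : Int) = false := by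
  intro a b ha hb
  unfold pvCnt at h
  have h1 := (Finset.sum_eq_zero_iff_of_nonneg
    (fun i _ => Finset.sum_nonneg (fun j _ => by split <;> omega))).mp h
    a (Finset.mem_range.mpr ha)
  have h2 := (Finset.sum_eq_zero_iff_of_nonneg
    (fun j _ => by split <;> omega)).mp h1 b (Finset.mem_range.mpr hb)
  by_contra hg
  have ht : g (a : Int) (b : Int) = true := by revert hg; cases g (a : Int) (b : Int) <;> simp
  simp [ht] at h2

-- the while-loop sums the layer counts
lemma pvLoopEq (height width : Nat) (g0 : Int → Int → Bool) :
    ∀ (fuel k : Nat) (grid' : List (List String)) (total : Int),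
      height + 1 = k + fuel →
      (∀ i j, pvGx grid' height width i j = (pvEr^[k] g0) i j) →
      pvLoop height width fuel grid' total
        = total + ∑ t ∈ Finset.Ico k (height + 1), pvCnt (pvEr^[t] g0) height width := by
  intro fuel
  induction fuel with
  | zero =>
    intro k grid' total hk hrep
    have hk1 : k = height + 1 := by omega
    subst hk1
    simp [pvLoop]
  | succ fuel ih =>
    intro k grid' total hk hrep
    have hcnt : (pvLayer grid' height width).2 = pvCnt (pvEr^[k] g0) height width := by
      rw [pvLayerSnd]
      unfold pvCnt
      exact Finset.sum_congr rfl (fun a _ => Finset.sum_congr rfl (fun b _ => by rw [hrep]))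
    show (if (pvLayer grid' height width).2 > 0
        then pvLoop height width fuel (pvLayer grid' height width).1
              (total + (pvLayer grid' height width).2)
        else total) = _
    by_cases hpos : (pvLayer grid' height width).2 > 0
    · rw [if_pos hpos]
      have hrep' : ∀ i j, pvGx (pvLayer grid' height width).1 height width i j
          = (pvEr^[k+1] g0) i j := by
        intro i j
        have hfun : pvGx grid' height width = pvEr^[k] g0 :=
          funext (fun i => funext (fun j => hrep i j))
        rw [pvLayerFst, hfun, ← Function.iterate_succ_apply' pvEr k g0]
      rw [ih (k+1) (pvLayer grid' height width).1 (total + (pvLayer grid' height width).2)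
          (by omega) hrep', hcnt]
      rw [Finset.sum_eq_sum_Ico_succ_bot (by omega : k < height + 1)]
      ring
    · rw [if_neg hpos]
      have hc0 : pvCnt (pvEr^[k] g0) height width = 0 := by
        rw [hcnt] at hpos
        have := pvCntNonneg (pvEr^[k] g0) height width
        omega
      have hall : ∀ t ∈ Finset.Ico k (height+1), pvCnt (pvEr^[t] g0) height width = 0 := by
        intro t ht
        unfold pvCnt
        rw [Finset.sum_eq_zero]
        intro aa haa
        rw [Finset.sum_eq_zero]
        intro bb hbb
        have hfalse := pvCntZero hc0 aa bb (Finset.mem_range.mp haa) (Finset.mem_range.mp hbb)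
        have hf : (pvEr^[t] g0) (aa : Int) (bb : Int) = false := by
          cases hcase : (pvEr^[t] g0) (aa : Int) (bb : Int)
          · rfl
          · exact absurd (pvMono g0 _ _ (Finset.mem_Ico.mp ht).1 hcase) (by simp [hfalse])
        simp [hf]
      rw [Finset.sum_eq_zero hall, add_zero]

-- per-cell value of B equals the number of layers the cell survives
lemma pvPerCell (grid : List (List String)) (height width : Nat)
    (a b : Nat) (ha : a < height) (hb : b < width) :
    (∑ t ∈ Finset.range (height + 1),
        (if (pvEr^[t] (pvGx grid height width)) (a : Int) (b : Int) then (1 : Int) else 0))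
      = (if pvCell grid a b == "#" then
          (pvHoles grid height width).foldl
            (fun d pq => min d (|(a : Int) - pq.1| + |(b : Int) - pq.2|))
            (min (min (min ((a : Int) + 1) ((height : Int) - (a : Int)))
                 ((b : Int) + 1)) ((width : Int) - (b : Int)))
        else 0) := by
  have hout : ∀ p q : Int, ¬(0 ≤ p ∧ p < (height:Int) ∧ 0 ≤ q ∧ q < (width:Int)) →
      pvGx grid height width p q = false := by
    intro p q hn; unfold pvGx; rw [decide_eq_false hn]; simp
  by_cases hc : (pvCell grid a b == "#") = true
  · -- a '#' cell: both sides are the erosion depth of the cell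
    have hgx : pvGx grid height width (a : Int) (b : Int) = true := by
      rw [pvGxNat _ _ _ _ _ ha hb]; exact hc
    have hex : ∃ k, (pvEr^[k] (pvGx grid height width)) (a : Int) (b : Int) = false := by
      refine ⟨a + 1, ?_⟩
      cases hcase : (pvEr^[a+1] (pvGx grid height width)) (a : Int) (b : Int)
      · rfl
      · have := (pvBall (a+1) _ _ _).mp hcase (-1) (b : Int) (by unfold pvDist; omega)
        rw [hout (-1) (b : Int) (by omega)] at this
        cases this
    classical
    set K := Nat.find hex with hKdef
    have hKspec : (pvEr^[K] (pvGx grid height width)) (a : Int) (b : Int) = false :=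
      Nat.find_spec hex
    have hfind : ∀ (p q : Int) (m : Nat), pvDist (a : Int) (b : Int) p q ≤ m →
        pvGx grid height width p q = false → K ≤ m := by
      intro p q m hd hg
      refine Nat.find_min' hex ?_
      cases hcase : (pvEr^[m] (pvGx grid height width)) (a : Int) (b : Int)
      · rfl
      · exact absurd ((pvBall m _ _ _).mp hcase p q hd) (by simp [hg])
    have hKmin : ∀ m, m < K → (pvEr^[m] (pvGx grid height width)) (a : Int) (b : Int) = true := by
      intro m hm
      have hnm := Nat.find_min hex hm
      cases hcase : (pvEr^[m] (pvGx grid height width)) (a : Int) (b : Int)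
      · exact absurd hcase hnm
      · rfl
    have hiff : ∀ t : Nat,
        ((pvEr^[t] (pvGx grid height width)) (a : Int) (b : Int) = true) ↔ t < K := by
      intro t
      constructor
      · intro htrue
        by_contra hKt
        have := pvMono (pvGx grid height width) (a : Int) (b : Int)
          (by omega : K ≤ t) htrue
        rw [hKspec] at this; cases this
      · exact hKmin t
    have hKle : K ≤ a + 1 := hfind (-1) (b : Int) (a+1) (by unfold pvDist; omega)
      (hout _ _ (by omega))
    -- the left-hand sum counts the t < K among 0 … height
    have hsum : ∀ N : Nat, K ≤ N →
        ∑ t ∈ Finset.range N, (if t < K then (1:Int) else 0) = K := by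
      intro N
      induction N with
      | zero => intro h0; simp [Nat.le_zero.mp h0]
      | succ N ihN =>
        intro hKN
        rw [Finset.sum_range_succ]
        by_cases hKN' : K ≤ N
        · rw [ihN hKN', if_neg (by omega)]; ring
        · have hKeq : K = N + 1 := by omega
          rw [if_pos (by omega)]
          have hones : ∑ t ∈ Finset.range N, (if t < K then (1:Int) else 0)
              = ∑ _t ∈ Finset.range N, (1:Int) :=
            Finset.sum_congr rfl (fun t ht => by
              rw [if_pos (by have := Finset.mem_range.mp ht; omega)])
          rw [hones, Finset.sum_const, Finset.card_range, hKeq]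
          push_cast; ring
    have hL : ∑ t ∈ Finset.range (height + 1),
        (if (pvEr^[t] (pvGx grid height width)) (a : Int) (b : Int) then (1:Int) else 0)
        = (K : Int) := by
      rw [Finset.sum_congr rfl (fun t _ => if_congr (hiff t) rfl rfl)]
      exact hsum (height + 1) (by omega)
    rw [hL, if_pos hc]
    -- now the fold over the hole list computes K as well
    have hmemHoles : ∀ pq : Int × Int, pq ∈ pvHoles grid height width →
        ∃ p q : Nat, pq = ((p : Int), (q : Int)) ∧ p < height ∧ q < width ∧
          ¬ (pvCell grid p q == "#") = true := by
      intro pq hpq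
      unfold pvHoles at hpq
      rcases List.mem_flatMap.mp hpq with ⟨p, hpmem, hin2⟩
      rcases List.mem_map.mp hin2 with ⟨q, hqf, heq⟩
      rcases List.mem_filter.mp hqf with ⟨hqmem, hpred⟩
      exact ⟨p, q, heq.symm, List.mem_range.mp hpmem, List.mem_range.mp hqmem,
        by simpa using hpred⟩
    have hKd0 : (K : Int) ≤ min (min (min ((a : Int) + 1) ((height : Int) - (a : Int)))
        ((b : Int) + 1)) ((width : Int) - (b : Int)) := by
      have k1 : K ≤ a + 1 := hKle
      have k2 : K ≤ height - a := hfind (height : Int) (b : Int) (height - a)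
        (by unfold pvDist; omega) (hout _ _ (by omega))
      have k3 : K ≤ b + 1 := hfind (a : Int) (-1) (b + 1)
        (by unfold pvDist; omega) (hout _ _ (by omega))
      have k4 : K ≤ width - b := hfind (a : Int) (width : Int) (width - b)
        (by unfold pvDist; omega) (hout _ _ (by omega))
      refine le_min (le_min (le_min ?_ ?_) ?_) ?_ <;> omega
    have hge : (K : Int) ≤ (pvHoles grid height width).foldl
        (fun d pq => min d (|(a : Int) - pq.1| + |(b : Int) - pq.2|))
        (min (min (min ((a : Int) + 1) ((height : Int) - (a : Int)))
          ((b : Int) + 1)) ((width : Int) - (b : Int))) := by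
      refine pvLeFoldlMin _ _ _ _ hKd0 ?_
      intro pq hpq
      obtain ⟨p, q, rfl, hp, hq, hcq⟩ := hmemHoles pq hpq
      have hgpq : pvGx grid height width (p : Int) (q : Int) = false := by
        rw [pvGxNat _ _ _ _ _ hp hq]
        cases hcase : (pvCell grid p q == "#")
        · rfl
        · exact absurd hcase hcq
      have := hfind (p : Int) (q : Int) (pvDist (a : Int) (b : Int) (p : Int) (q : Int))
        le_rfl hgpq
      unfold pvDist at this
      simp only [Int.abs_eq_natAbs]
      omega
    have hle : (pvHoles grid height width).foldl
        (fun d pq => min d (|(a : Int) - pq.1| + |(b : Int) - pq.2|))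
        (min (min (min ((a : Int) + 1) ((height : Int) - (a : Int)))
          ((b : Int) + 1)) ((width : Int) - (b : Int))) ≤ (K : Int) := by
      have hnot : ¬ ∀ p q : Int, pvDist (a : Int) (b : Int) p q ≤ K →
          pvGx grid height width p q = true := by
        intro hforall
        rw [(pvBall K _ _ _).mpr hforall] at hKspec
        cases hKspec
      push_neg at hnot
      obtain ⟨p, q, hd, hg⟩ := hnot
      have hgf : pvGx grid height width p q = false := by
        cases hcase : pvGx grid height width p q
        · rfl
        · exact absurd hcase hg
      have hd0le := pvFoldlMinLeInit
        (fun pq : Int × Int => |(a : Int) - pq.1| + |(b : Int) - pq.2|)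
        (pvHoles grid height width)
        (min (min (min ((a : Int) + 1) ((height : Int) - (a : Int)))
          ((b : Int) + 1)) ((width : Int) - (b : Int)))
      by_cases hin : 0 ≤ p ∧ p < (height : Int) ∧ 0 ≤ q ∧ q < (width : Int)
      · -- the witness is an in-range hole
        obtain ⟨h0p, hph, h0q, hqw⟩ := hin
        obtain ⟨pn, rfl⟩ : ∃ pn : Nat, p = (pn : Int) := ⟨p.toNat, (Int.toNat_of_nonneg h0p).symm⟩
        obtain ⟨qn, rfl⟩ : ∃ qn : Nat, q = (qn : Int) := ⟨q.toNat, (Int.toNat_of_nonneg h0q).symm⟩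
        have hpn : pn < height := by exact_mod_cast hph
        have hqn : qn < width := by exact_mod_cast hqw
        have hcell : ¬ (pvCell grid pn qn == "#") = true := by
          rw [pvGxNat _ _ _ _ _ hpn hqn] at hgf
          simp [hgf]
        have hmem : ((pn : Int), (qn : Int)) ∈ pvHoles grid height width := by
          unfold pvHoles
          refine List.mem_flatMap.mpr ⟨pn, List.mem_range.mpr hpn, ?_⟩
          refine List.mem_map.mpr ⟨qn, ?_, rfl⟩
          refine List.mem_filter.mpr ⟨List.mem_range.mpr hqn, ?_⟩
          cases hcase : (pvCell grid pn qn == "#") with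
          | false => simp [hcase]
          | true => exact absurd hcase hcell
        have hfle := pvFoldlMinLeMem
          (fun pq : Int × Int => |(a : Int) - pq.1| + |(b : Int) - pq.2|)
          (pvHoles grid height width)
          (min (min (min ((a : Int) + 1) ((height : Int) - (a : Int)))
            ((b : Int) + 1)) ((width : Int) - (b : Int)))
          ((pn : Int), (qn : Int)) hmem
        refine le_trans hfle ?_
        unfold pvDist at hd
        simp only [Int.abs_eq_natAbs]
        omega
      · -- the witness is out of range: the seed min already is ≤ K
        unfold pvDist at hd
        refine le_trans hd0le ?_
        by_cases hp1 : p < 0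
        · have : (a : Int) + 1 ≤ (K : Int) := by omega
          omega
        · by_cases hp2 : (height : Int) ≤ p
          · have : (height : Int) - (a : Int) ≤ (K : Int) := by omega
            omega
          · by_cases hq1 : q < 0
            · have : (b : Int) + 1 ≤ (K : Int) := by omega
              omega
            · have hq2 : (width : Int) ≤ q := by omega
              have : (width : Int) - (b : Int) ≤ (K : Int) := by omega
              omega
    exact le_antisymm hge hle
  · -- not a '#' cell: depth 0 on both sides
    have hgx : pvGx grid height width (a : Int) (b : Int) = false := by
      rw [pvGxNat _ _ _ _ _ ha hb]
      cases hcase : (pvCell grid a b == "#")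
      · rfl
      · exact absurd hcase hc
    rw [if_neg hc, Finset.sum_eq_zero]
    intro t _
    have hf : (pvEr^[t] (pvGx grid height width)) (a : Int) (b : Int) = false := by
      cases hcase : (pvEr^[t] (pvGx grid height width)) (a : Int) (b : Int)
      · rfl
      · have := (pvBall t _ _ _).mp hcase (a : Int) (b : Int) (by unfold pvDist; simp)
        rw [hgx] at this; cases this
    simp [hf]

-- ===== VERDICT (by name: the statement is the Claim_ definition above) =====
theorem dig_map_spec : Claim_equal_dig_map := by
  unfold Claim_equal_dig_map
  intro grid _ _
  unfold Spec_dig_map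
  have hA : dig_map grid = 0 + ∑ t ∈ Finset.Ico 0 (grid.length + 1),
      pvCnt (pvEr^[t] (pvGx grid grid.length (grid.headD []).length))
        grid.length (grid.headD []).length := by
    unfold dig_map
    exact pvLoopEq grid.length (grid.headD []).length _ (grid.length + 1) 0 grid 0
      (by omega) (fun i j => by simp)
  have hB : dig_map_alt grid = ∑ i ∈ Finset.range grid.length,
      ∑ j ∈ Finset.range (grid.headD []).length,
      (if pvCell grid i j == "#" then
          (pvHoles grid grid.length (grid.headD []).length).foldl
            (fun d pq => min d (|(i : Int) - pq.1| + |(j : Int) - pq.2|))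
            (min (min (min ((i : Int) + 1) ((grid.length : Int) - (i : Int)))
                 ((j : Int) + 1)) (((grid.headD []).length : Int) - (j : Int)))
        else 0) := by
    unfold dig_map_alt
    show (List.range grid.length).foldl (fun total i =>
        (List.range (grid.headD []).length).foldl (fun total j =>
          if pvCell grid i j == "#" then
            total + ((pvHoles grid grid.length (grid.headD []).length).foldl
              (fun d pq => min d (|(i : Int) - pq.1| + |(j : Int) - pq.2|))
              (min (min (min ((i : Int) + 1) ((grid.length : Int) - (i : Int)))
                   ((j : Int) + 1)) (((grid.headD []).length : Int) - (j : Int))))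
          else total) total) 0 = _
    rw [pvFoldlAdd _ (fun i => ∑ j ∈ Finset.range (grid.headD []).length,
        (if pvCell grid i j == "#" then
            (pvHoles grid grid.length (grid.headD []).length).foldl
              (fun d pq => min d (|(i : Int) - pq.1| + |(j : Int) - pq.2|))
              (min (min (min ((i : Int) + 1) ((grid.length : Int) - (i : Int)))
                   ((j : Int) + 1)) (((grid.headD []).length : Int) - (j : Int)))
          else 0))
        (fun t x => by
          rw [pvFoldlAdd _ (fun j => if pvCell grid x j == "#" then
              (pvHoles grid grid.length (grid.headD []).length).foldl
                (fun d pq => min d (|(x : Int) - pq.1| + |(j : Int) - pq.2|))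
                (min (min (min ((x : Int) + 1) ((grid.length : Int) - (x : Int)))
                     ((j : Int) + 1)) (((grid.headD []).length : Int) - (j : Int)))
            else 0)
            (fun t j => by by_cases hc : pvCell grid x j == "#" <;> simp [hc]),
            pvRangeSum]),
      pvRangeSum, zero_add]
  rw [hA, hB, zero_add, ← Finset.range_eq_Ico]
  unfold pvCnt
  rw [Finset.sum_comm]
  refine Finset.sum_congr rfl (fun i hi => ?_)
  rw [Finset.sum_comm]
  refine Finset.sum_congr rfl (fun j hj => ?_)
  exact pvPerCell grid grid.length (grid.headD []).length i j
    (Finset.mem_range.mp hi) (Finset.mem_range.mp hj)
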